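-- pv_equiv track=rewrite | github.com/chenj777-lab/llm_data | py_script/summary_changbolv_fix_bk-2.py | filename_construct
-- ===== SOURCE A (Python) =====
-- def filename_construct(file,name):
--     str_list = file.split('.')
--     tmp = ''
--     length = len(str_list)
--     if length == 1 or (length == 2 and str_list[0] == ''):
--         return file + '_' + name
--
--     str_begin_flag = True
--     split_str = ''
--     for i in range(length):
--         if i == length - 1:
--             tmp = tmp + '_' + name
--         tmp = tmp + split_str + str_list[i]
--
--         if str_begin_flag is True:
--             str_begin_flag = False
--             split_str = '.'
--     return tmp
-- ===== SOURCE B (Python) =====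
-- def filename_construct(file, name):
--     idx = file.rfind('.')
--     if idx <= 0:
--         return file + '_' + name
--     return file[:idx] + '_' + name + file[idx:]
-- ===== Notes on version B (the rewrite author's own statement) =====
-- stated objective: simpler
-- what changed: Replaces splitting on '.' into a list and rebuilding it with an indexed loop and separator/flag state by a single rfind of the last dot and two slices around it.
import Mathlib
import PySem

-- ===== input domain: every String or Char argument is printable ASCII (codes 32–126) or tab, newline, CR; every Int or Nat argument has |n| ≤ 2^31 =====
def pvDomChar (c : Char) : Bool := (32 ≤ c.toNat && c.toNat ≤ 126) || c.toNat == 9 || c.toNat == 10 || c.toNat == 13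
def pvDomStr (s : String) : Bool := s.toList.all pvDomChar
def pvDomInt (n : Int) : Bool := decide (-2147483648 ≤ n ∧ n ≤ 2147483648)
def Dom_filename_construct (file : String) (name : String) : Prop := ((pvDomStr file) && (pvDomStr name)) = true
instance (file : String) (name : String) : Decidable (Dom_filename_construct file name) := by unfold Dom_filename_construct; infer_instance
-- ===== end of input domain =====

-- B replaces A's split-into-a-list-and-rebuild loop by one rfind of the last dot and two slices (simpler; same cost).

-- ===== PORT A =====
-- the for-loop over str_list with its state (tmp, str_begin_flag, split_str); the singleton
-- pattern is exactly the `i == length - 1` iteration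
def pvLoopA (name : List Char) : List (List Char) → List Char → Bool → List Char → List Char
  | [], tmp, _, _ => tmp
  | [p], tmp, _, split_str => tmp ++ '_' :: name ++ split_str ++ p
  | p :: q :: rest, tmp, str_begin_flag, split_str =>
      pvLoopA name (q :: rest) (tmp ++ split_str ++ p) false
        (if str_begin_flag then ['.'] else split_str)

def filename_construct (file : String) (name : String) : String :=
  let str_list := PySem.Chars.splitOn file.toList ['.']
  let length := str_list.length
  if length = 1 ∨ (length = 2 ∧ PySem.List.pyGet? str_list 0 = some []) then
    String.mk (file.toList ++ '_' :: name.toList)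
  else
    String.mk (pvLoopA name.toList str_list [] true [])

-- ===== PORT B =====
def filename_construct_alt (file : String) (name : String) : String :=
  let idx := PySem.Str.rfind file "."
  if idx ≤ 0 then
    String.mk (file.toList ++ '_' :: name.toList)
  else
    String.mk (PySem.List.slice file.toList none (some idx) ++ '_' :: name.toList ++
      PySem.List.slice file.toList (some idx) none)

-- ===== PRECONDITION & SPEC =====
def Spec_filename_construct (file : String) (name : String) (out : String) : Prop := out = filename_construct_alt file name
instance (file : String) (name : String) (out : String) : Decidable (Spec_filename_construct file name out) := by unfold Spec_filename_construct; infer_instance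

-- ===== CLAIM (what is proved, stated in full; the proofs are below) =====
def Claim_equal_filename_construct : Prop := ∀ (file : String) (name : String), Dom_filename_construct file name → Spec_filename_construct file name (filename_construct file name)

-- ===== LEMMAS AND PROOFS =====

-- reference recursion for split('.') used only in the proofs
def pvSplitc : List Char → List (List Char)
  | [] => [[]]
  | a :: rest => if a = '.' then [] :: pvSplitc rest else (pvSplitc rest).modifyHead (a :: ·)

lemma pvSplitc_ne_nil (cs : List Char) : pvSplitc cs ≠ [] := by
  cases cs with
  | nil => simp [pvSplitc]
  | cons a rest =>
    simp only [pvSplitc]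
    split_ifs
    · simp
    · cases h : pvSplitc rest with
      | nil => exact absurd h (pvSplitc_ne_nil rest)
      | cons x xs => simp [h]

lemma pvIsPrefixOf_singleton (c : Char) (l : List Char) :
    List.isPrefixOf [c] l = (l.head? == some c) := by
  cases l <;> simp [List.isPrefixOf, eq_comm]

lemma pvSplitOn_go_eq (fuel : Nat) (cs cur : List Char) (acc : List (List Char))
    (h : cs.length < fuel) :
    PySem.Chars.splitOn.go ['.'] fuel cs cur acc
      = acc.reverse ++ (pvSplitc cs).modifyHead (cur.reverse ++ ·) := by
  induction fuel generalizing cs cur acc with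
  | zero => omega
  | succ fuel ih =>
    cases cs with
    | nil => simp [PySem.Chars.splitOn.go, pvSplitc]
    | cons c rest =>
      rw [show PySem.Chars.splitOn.go ['.'] (fuel+1) (c :: rest) cur acc =
          if List.isPrefixOf ['.'] (c :: rest) then
            PySem.Chars.splitOn.go ['.'] fuel (List.drop 1 (c::rest)) [] (cur.reverse :: acc)
          else PySem.Chars.splitOn.go ['.'] fuel rest (c :: cur) acc from by
        simp [PySem.Chars.splitOn.go]]
      rw [pvIsPrefixOf_singleton]
      by_cases hc : c = '.'
      · subst hc
        simp only [List.head?_cons, beq_self_eq_true, if_true, List.drop_succ_cons,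
          List.drop_zero]
        rw [ih rest [] _ (by simpa using h)]
        simp only [pvSplitc, if_pos rfl, List.reverse_cons, List.reverse_nil, List.nil_append,
          List.modifyHead_cons, List.append_assoc, List.singleton_append]
        cases hsp : pvSplitc rest with
        | nil => exact absurd hsp (pvSplitc_ne_nil rest)
        | cons x xs => simp
      · simp only [List.head?_cons, show (some c == some '.') = false by simpa using hc,
          if_false]
        rw [ih rest (c :: cur) acc (by simpa using Nat.lt_of_succ_lt_succ h)]
        simp only [pvSplitc, if_neg hc]
        congr 1
        cases hsp : pvSplitc rest with
        | nil => exact absurd hsp (pvSplitc_ne_nil rest)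
        | cons x xs => simp

lemma pvSplitOn_eq (cs : List Char) : PySem.Chars.splitOn cs ['.'] = pvSplitc cs := by
  rw [show PySem.Chars.splitOn cs ['.'] =
      PySem.Chars.splitOn.go ['.'] (cs.length + 1) cs [] [] from rfl]
  rw [pvSplitOn_go_eq _ _ _ _ (Nat.lt_succ_self _)]
  cases hsp : pvSplitc cs with
  | nil => exact absurd hsp (pvSplitc_ne_nil cs)
  | cons x xs => simp

def pvJoinTail (ts : List (List Char)) : List Char := ts.flatMap (fun t => '.' :: t)

lemma pvJoin_splitc (cs : List Char) :
    ∀ h t, pvSplitc cs = h :: t → h ++ pvJoinTail t = cs := by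
  induction cs with
  | nil =>
    intro h t he
    simp only [pvSplitc] at he
    injection he with h1 h2; subst h1; subst h2; rfl
  | cons a rest ih =>
    intro h t he
    by_cases ha : a = '.'
    · subst ha
      simp only [pvSplitc] at he
      injection he with h1 h2
      subst h1; subst h2
      cases hsp : pvSplitc rest with
      | nil => exact absurd hsp (pvSplitc_ne_nil rest)
      | cons x xs =>
        have hx := ih x xs hsp
        simp only [pvJoinTail, List.flatMap_cons] at hx ⊢
        simp [← hx]
    · simp only [pvSplitc, if_neg ha] at he
      cases hsp : pvSplitc rest with
      | nil => exact absurd hsp (pvSplitc_ne_nil rest)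
      | cons x xs =>
        rw [hsp] at he
        simp only [List.modifyHead_cons] at he
        injection he with h1 h2
        subst h1; subst h2
        have hx := ih x xs hsp
        rw [List.cons_append, hx]

lemma pvSplitc_no_dot (cs : List Char) (h : '.' ∉ cs) : pvSplitc cs = [cs] := by
  induction cs with
  | nil => rfl
  | cons a rest ih =>
    simp only [List.mem_cons, not_or] at h
    simp [pvSplitc, Ne.symm h.1, ih h.2]

lemma pvSplitc_append_dot (pre suf : List Char) (h : '.' ∉ suf) :
    pvSplitc (pre ++ '.' :: suf) = pvSplitc pre ++ [suf] := by
  induction pre with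
  | nil => simp [pvSplitc, pvSplitc_no_dot suf h]
  | cons a pre ih =>
    by_cases ha : a = '.'
    · subst ha; simp [pvSplitc, ih]
    · simp only [List.cons_append, pvSplitc, if_neg ha, ih]
      cases hsp : pvSplitc pre with
      | nil => exact absurd hsp (pvSplitc_ne_nil pre)
      | cons x xs => simp

lemma pvRfind_go_neg (cs : List Char) (j : Nat)
    (h : ∀ i, i ≤ j → cs[i]? ≠ some '.') :
    PySem.Chars.rfind.go cs ['.'] j = -1 := by
  induction j with
  | zero =>
    rw [show PySem.Chars.rfind.go cs ['.'] 0 =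
        if List.isPrefixOf ['.'] cs then (0:Int) else -1 from by simp [PySem.Chars.rfind.go]]
    rw [pvIsPrefixOf_singleton]
    have := h 0 le_rfl
    cases cs with
    | nil => simp
    | cons c rest => simp at this ⊢; simpa using this
  | succ j ih =>
    rw [show PySem.Chars.rfind.go cs ['.'] (j+1) =
        if List.isPrefixOf ['.'] (cs.drop (j+1)) then ((j:Int)+1)
        else PySem.Chars.rfind.go cs ['.'] j from by simp [PySem.Chars.rfind.go]]
    rw [pvIsPrefixOf_singleton, List.head?_drop]
    have h1 := h (j+1) le_rfl
    rw [show (cs[j+1]? == some '.') = false by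
      cases hx : cs[j+1]? with
      | none => rfl
      | some v => simp; intro hv; exact h1 (hv ▸ hx)]
    exact ih (fun i hi => h i (Nat.le_succ_of_le hi))

lemma pvRfind_go_pos (pre suf cs : List Char) (hcs : cs = pre ++ '.' :: suf)
    (hsuf : ∀ i, pre.length < i → cs[i]? ≠ some '.') :
    ∀ j, pre.length ≤ j → PySem.Chars.rfind.go cs ['.'] j = pre.length := by
  intro j
  induction j with
  | zero =>
    intro hj
    have hp : pre = [] := List.eq_nil_of_length_eq_zero (Nat.le_zero.mp hj)
    subst hp
    rw [show PySem.Chars.rfind.go cs ['.'] 0 =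
        if List.isPrefixOf ['.'] cs then (0:Int) else -1 from by simp [PySem.Chars.rfind.go]]
    simp [hcs]
  | succ j ih =>
    intro hj
    rw [show PySem.Chars.rfind.go cs ['.'] (j+1) =
        if List.isPrefixOf ['.'] (cs.drop (j+1)) then ((j:Int)+1)
        else PySem.Chars.rfind.go cs ['.'] j from by simp [PySem.Chars.rfind.go]]
    rw [pvIsPrefixOf_singleton, List.head?_drop]
    by_cases he : pre.length = j + 1
    · have : cs[j+1]? = some '.' := by
        rw [hcs, ← he]
        simp
      simp [this, he]
    · have hlt : pre.length ≤ j := by omega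
      have h1 := hsuf (j+1) (by omega)
      rw [show (cs[j+1]? == some '.') = false by
        cases hx : cs[j+1]? with
        | none => rfl
        | some v => simp; intro hv; exact h1 (hv ▸ hx)]
      exact ih hlt

lemma pvLastDot (cs : List Char) (h : '.' ∈ cs) :
    ∃ pre suf, cs = pre ++ '.' :: suf ∧ '.' ∉ suf := by
  induction cs with
  | nil => simp at h
  | cons a rest ih =>
    by_cases hr : '.' ∈ rest
    · obtain ⟨p, s, hps, hns⟩ := ih hr
      exact ⟨a :: p, s, by simp [hps], hns⟩
    · have ha : a = '.' := by
        rcases List.mem_cons.mp h with h' | h'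
        · exact h'.symm
        · exact absurd h' hr
      exact ⟨[], rest, by simp [ha], hr⟩

lemma pvLoopA_main (name : List Char) (qs : List (List Char)) (p : List Char) :
    ∀ tmp, pvLoopA name (qs ++ [p]) tmp false ['.']
      = tmp ++ pvJoinTail qs ++ '_' :: name ++ '.' :: p := by
  induction qs with
  | nil => intro tmp; simp [pvLoopA, pvJoinTail]
  | cons q qs ih =>
    intro tmp
    cases hq : qs ++ [p] with
    | nil => simp at hq
    | cons x xs =>
      simp only [List.cons_append, hq, pvLoopA, if_neg (by simp : ¬ (false = true))]
      rw [← hq, ih]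
      simp [pvJoinTail]

-- value of A on file.toList, fully characterized
lemma pvA_eq_B (file name : String) :
    filename_construct file name = filename_construct_alt file name := by
  unfold filename_construct filename_construct_alt
  have hr : PySem.Str.rfind file "." = PySem.Chars.rfind.go file.toList ['.'] file.toList.length := rfl
  rw [hr, pvSplitOn_eq]
  by_cases hdot : '.' ∈ file.toList
  · obtain ⟨pre, suf, hps, hnsuf⟩ := pvLastDot file.toList hdot
    have hsuf_idx : ∀ i, pre.length < i → file.toList[i]? ≠ some '.' := by
      intro i hi hc
      have : ('.' : Char) ∈ file.toList := List.mem_of_getElem? hc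
      rw [hps] at hc
      rw [List.getElem?_append_right (by omega)] at hc
      rcases Nat.exists_eq_add_of_lt hi with ⟨k, hk⟩
      rw [show i - pre.length = k + 1 by omega] at hc
      simp only [List.getElem?_cons_succ] at hc
      exact hnsuf (List.mem_of_getElem? hc)
    have hrv : PySem.Chars.rfind.go file.toList ['.'] file.toList.length = pre.length := by
      apply pvRfind_go_pos pre suf _ hps hsuf_idx
      simp [hps]
    rw [hrv, hps, pvSplitc_append_dot pre suf hnsuf]
    cases hsp : pvSplitc pre with
    | nil => exact absurd hsp (pvSplitc_ne_nil pre)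
    | cons h t =>
      have hpre : h ++ pvJoinTail t = pre := pvJoin_splitc pre h t hsp
      by_cases hp0 : pre = []
      · subst hp0
        simp only [pvSplitc] at hsp
        injection hsp with h1 h2
        subst h1; subst h2
        simp [PySem.List.pyGet?, PySem.List.pyIdx?]
      · have hlen : 0 < pre.length := List.length_pos_iff.mpr hp0
        rw [if_neg (by intro hcond; omega : ¬ ((pre.length : Int) ≤ 0))]
        rw [if_neg ?hcond]
        case hcond =>
          rintro (h1 | ⟨h2, h3⟩)
          · simp at h1
          · -- length 2 means t = [], so h = pre ≠ []
            have ht : t = [] := by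
              have : (h :: t).length = 1 := by simpa using h2
              simpa using this
            subst ht
            simp only [pvJoinTail, List.flatMap_nil, List.append_nil] at hpre
            subst hpre
            simp [PySem.List.pyGet?, PySem.List.pyIdx?] at h3
            exact hp0 h3
        -- main branch
        rw [show (h :: t) ++ [suf] = h :: (t ++ [suf]) by simp]
        congr 1
        cases htl : t ++ [suf] with
        | nil => simp at htl
        | cons x xs =>
          simp only [pvLoopA, if_pos trivial, List.nil_append]
          rw [← htl, pvLoopA_main]
          rw [PySem.List.slice_to _ (by positivity), PySem.List.slice_from _ (by positivity)]
          simp only [Int.toNat_natCast, List.take_left, List.drop_left]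
          rw [← hpre]
  · -- no dot: split has length 1, rfind = -1
    have hrv : PySem.Chars.rfind.go file.toList ['.'] file.toList.length = -1 := by
      apply pvRfind_go_neg
      intro i _ hc
      exact hdot (List.mem_of_getElem? hc)
    rw [hrv, pvSplitc_no_dot _ hdot]
    simp

-- ===== VERDICT (by name: the statement is the Claim_ definition above) =====
theorem filename_construct_spec : Claim_equal_filename_construct := by
  intro file name _
  unfold Spec_filename_construct
  exact pvA_eq_B file name
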